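-- pv_equiv track=rewrite | github.com/nyucel/blm2010 | butunleme/180401057/turev.py | degerler_xi
-- ===== SOURCE A (Python) =====
-- def degerler_xi(elemanSayisi):
--     degerler = []
--     for i in range(0, 7):
--         x = 0
--         for k in range(elemanSayisi):
--             x += (k + 1) ** i
--         degerler.append(x)
--     return degerler
-- ===== SOURCE B (Python) =====
-- def degerler_xi(elemanSayisi):
--     n = elemanSayisi
--     if n <= 0:
--         return [0] * 7
--     s1 = n * (n + 1) // 2
--     return [
--         n,
--         s1,
--         n * (n + 1) * (2 * n + 1) // 6,
--         s1 ** 2,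
--         n * (n + 1) * (2 * n + 1) * (3 * n * n + 3 * n - 1) // 30,
--         n * n * (n + 1) * (n + 1) * (2 * n * n + 2 * n - 1) // 12,
--         n * (n + 1) * (2 * n + 1) * (3 * n ** 4 + 6 * n ** 3 - 3 * n + 1) // 42,
--     ]
-- ===== Notes on version B (the rewrite author's own statement) =====
-- stated objective: faster
-- what changed: Replaces the O(n) accumulation loop over k=1..n with Faulhaber closed-form power-sum formulas for each exponent 0..6, computed in O(1).
import Mathlib
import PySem

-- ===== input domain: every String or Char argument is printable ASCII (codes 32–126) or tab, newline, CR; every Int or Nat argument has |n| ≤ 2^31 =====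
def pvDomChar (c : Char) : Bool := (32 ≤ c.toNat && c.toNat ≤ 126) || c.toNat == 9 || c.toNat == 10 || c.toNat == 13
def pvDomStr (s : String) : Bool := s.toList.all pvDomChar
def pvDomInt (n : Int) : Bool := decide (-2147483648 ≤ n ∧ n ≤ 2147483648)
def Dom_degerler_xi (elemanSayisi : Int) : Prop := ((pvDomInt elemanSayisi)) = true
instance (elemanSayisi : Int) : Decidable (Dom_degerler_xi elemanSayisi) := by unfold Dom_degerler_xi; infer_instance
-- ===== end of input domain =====

-- B replaces A's O(n) summation loop with the Faulhaber closed-form formulas (O(1)).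

-- ===== PORT A =====
-- literal transliteration: outer loop over i in range(0,7), inner loop over k in range(elemanSayisi);
-- the exponent i is a nonnegative loop index, so `(k+1) ** i` is ported as `(k+1) ^ i.toNat`.
def degerler_xi (elemanSayisi : Int) : List Int :=
  (PySem.List.pyRange 0 7 1).foldl (fun degerler i =>
    degerler ++ [(PySem.List.pyRange 0 elemanSayisi 1).foldl (fun x k => x + (k + 1) ^ i.toNat) 0]) []

-- ===== PORT B =====
def degerler_xi_alt (elemanSayisi : Int) : List Int :=
  let n := elemanSayisi
  if n ≤ 0 then [0, 0, 0, 0, 0, 0, 0]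
  else
    let s1 := PySem.Int.floordiv (n * (n + 1)) 2
    [ n,
      s1,
      PySem.Int.floordiv (n * (n + 1) * (2 * n + 1)) 6,
      s1 ^ 2,
      PySem.Int.floordiv (n * (n + 1) * (2 * n + 1) * (3 * n * n + 3 * n - 1)) 30,
      PySem.Int.floordiv (n * n * (n + 1) * (n + 1) * (2 * n * n + 2 * n - 1)) 12,
      PySem.Int.floordiv (n * (n + 1) * (2 * n + 1) * (3 * n ^ 4 + 6 * n ^ 3 - 3 * n + 1)) 42 ]

-- ===== PRECONDITION & SPEC =====
def Spec_degerler_xi (elemanSayisi : Int) (out : List Int) : Prop := out = degerler_xi_alt elemanSayisi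
instance (elemanSayisi : Int) (out : List Int) : Decidable (Spec_degerler_xi elemanSayisi out) := by unfold Spec_degerler_xi; infer_instance

-- ===== CLAIM (what is proved, stated in full; the proofs are below) =====
def Claim_equal_degerler_xi : Prop := ∀ (elemanSayisi : Int), Dom_degerler_xi elemanSayisi → Spec_degerler_xi elemanSayisi (degerler_xi elemanSayisi)

-- ===== LEMMAS AND PROOFS =====

-- the inner loop of A, as a function of the exponent
def pvS (i : Nat) (n : Int) : Int :=
  (PySem.List.pyRange 0 n 1).foldl (fun x k => x + (k + 1) ^ i) 0

theorem pvS_nonpos (i : Nat) (n : Int) (h : n ≤ 0) : pvS i n = 0 := by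
  simp [pvS, PySem.List.pyRange_one_eq_nil h]

theorem pvS_succ (i : Nat) (m : Nat) : pvS i ((m : Int) + 1) = pvS i m + ((m : Int) + 1) ^ i := by
  unfold pvS
  rw [PySem.List.pyRange_one_succ_right (by positivity), List.foldl_append]
  simp

theorem pvS0 (m : Nat) : pvS 0 (m : Int) = m := by
  induction m with
  | zero => simp [pvS_nonpos]
  | succ m ih => push_cast [pvS_succ, ih]; ring

theorem pvS1 (m : Nat) : 2 * pvS 1 (m : Int) = (m : Int) * ((m : Int) + 1) := by
  induction m with
  | zero => simp [pvS_nonpos]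
  | succ m ih => push_cast [pvS_succ]; linear_combination ih

theorem pvS2 (m : Nat) : 6 * pvS 2 (m : Int) = (m : Int) * ((m : Int) + 1) * (2 * m + 1) := by
  induction m with
  | zero => simp [pvS_nonpos]
  | succ m ih => push_cast [pvS_succ]; linear_combination ih

theorem pvS3 (m : Nat) : pvS 3 (m : Int) = (pvS 1 (m : Int)) ^ 2 := by
  induction m with
  | zero => simp [pvS_nonpos]
  | succ m ih =>
    have h1 := pvS1 m
    push_cast [pvS_succ, ih]
    nlinarith [h1]

theorem pvS4 (m : Nat) : 30 * pvS 4 (m : Int) =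
    (m : Int) * ((m : Int) + 1) * (2 * m + 1) * (3 * (m : Int) * m + 3 * m - 1) := by
  induction m with
  | zero => simp [pvS_nonpos]
  | succ m ih => push_cast [pvS_succ]; linear_combination ih

theorem pvS5 (m : Nat) : 12 * pvS 5 (m : Int) =
    (m : Int) * m * ((m : Int) + 1) * ((m : Int) + 1) * (2 * (m : Int) * m + 2 * m - 1) := by
  induction m with
  | zero => simp [pvS_nonpos]
  | succ m ih => push_cast [pvS_succ]; linear_combination ih

theorem pvS6 (m : Nat) : 42 * pvS 6 (m : Int) =
    (m : Int) * ((m : Int) + 1) * (2 * m + 1) * (3 * (m : Int) ^ 4 + 6 * (m : Int) ^ 3 - 3 * m + 1) := by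
  induction m with
  | zero => simp [pvS_nonpos]
  | succ m ih => push_cast [pvS_succ]; linear_combination ih

-- exact division: d * x // d = x for positive d
theorem pv_fdiv_cancel (d x : Int) (hd : 0 < d) : PySem.Int.floordiv (d * x) d = x := by
  rw [PySem.Int.floordiv_eq_ediv_of_pos hd, Int.mul_ediv_cancel_left x (by omega)]

theorem degerler_xi_eq_pvS (n : Int) :
    degerler_xi n = [pvS 0 n, pvS 1 n, pvS 2 n, pvS 3 n, pvS 4 n, pvS 5 n, pvS 6 n] := by
  have h7 : PySem.List.pyRange 0 7 1 = [0, 1, 2, 3, 4, 5, 6] := by decide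
  simp [degerler_xi, h7, pvS, List.foldl]

-- ===== VERDICT (by name: the statement is the Claim_ definition above) =====
theorem degerler_xi_spec : Claim_equal_degerler_xi := by
  intro n _
  show degerler_xi n = degerler_xi_alt n
  rw [degerler_xi_eq_pvS]
  by_cases h : n ≤ 0
  · simp [degerler_xi_alt, h, pvS_nonpos]
  · rw [not_le] at h
    obtain ⟨m, rfl⟩ : ∃ m : Nat, n = (m : Int) := ⟨n.toNat, (Int.toNat_of_nonneg (by omega)).symm⟩
    have e1 : PySem.Int.floordiv ((m : Int) * ((m : Int) + 1)) 2 = pvS 1 m := by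
      rw [← pvS1 m]; exact pv_fdiv_cancel 2 _ (by omega)
    simp only [degerler_xi_alt, if_neg (by omega : ¬ (m : Int) ≤ 0)]
    rw [e1, pvS0 m, pvS3 m, ← pvS6 m, ← pvS4 m, ← pvS5 m, ← pvS2 m,
      pv_fdiv_cancel 6 _ (by omega), pv_fdiv_cancel 30 _ (by omega),
      pv_fdiv_cancel 12 _ (by omega), pv_fdiv_cancel 42 _ (by omega)]
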